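-- pv_equiv track=rewrite | github.com/robbert1978/ctf-2024 | 0ops/IPManagementSystem/solve.py | craft
-- ===== SOURCE A (Python) =====
-- def craft(_data):
--     payload = ''
--     for value in _data:
--         for i in range(64):
--             if(value & 1):
--                 payload += '1'
--             else:
--                 payload += '0'
--             value >>= 1
--     return payload
-- ===== SOURCE B (Python) =====
-- def craft(_data):
--     return ''.join(format(value % (1 << 64), '064b')[::-1] for value in _data)
-- ===== Notes on version B (the rewrite author's own statement) =====
-- stated objective: faster
-- what changed: Replaces the 64-iteration per-value bit-extraction loop with quadratic character-by-character string concatenation by a single format(value % 2**64, '064b') conversion reversed per value, accumulated with one join.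
import Mathlib
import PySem

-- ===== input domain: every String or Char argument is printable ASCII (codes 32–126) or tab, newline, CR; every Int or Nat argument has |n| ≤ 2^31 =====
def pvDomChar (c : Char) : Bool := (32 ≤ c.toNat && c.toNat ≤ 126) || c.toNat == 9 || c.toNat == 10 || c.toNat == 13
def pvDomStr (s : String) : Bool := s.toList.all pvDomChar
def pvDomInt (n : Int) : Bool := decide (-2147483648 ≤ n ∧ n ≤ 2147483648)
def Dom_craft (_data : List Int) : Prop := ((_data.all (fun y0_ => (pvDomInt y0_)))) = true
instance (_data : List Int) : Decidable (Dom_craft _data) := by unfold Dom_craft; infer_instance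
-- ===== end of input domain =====

-- B replaces A's 64-iteration per-value bit-extraction loop and char-by-char accumulation with one
-- binary formatting (value % 2**64, '064b'), reversed per value, joined once (simpler).

-- ===== PORT A =====
def craft (_data : List Int) : String :=
  _data.foldl (fun payload value =>
    -- for i in range(64): the body ignores i; value & 1 → PySem.Int.band, value >> 1 → >>> (1:Nat)
    ((List.range 64).foldl (fun (st : String × Int) _ =>
        (if PySem.Int.band st.2 1 ≠ 0 then st.1 ++ "1" else st.1 ++ "0", st.2 >>> (1:Nat)))
      (payload, value)).1) ""

-- ===== PORT B =====
-- hand port of format(m, 'b'): big-endian binary digits of m (empty only for 0); exact for m ≥ 0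
def natBits : Nat → List Char
  | 0 => []
  | (n+1) => natBits ((n+1)/2) ++ [if (n+1) % 2 = 1 then '1' else '0']

-- hand port of format(m, '064b'): left-pad the digits with '0' to width 64; exact (format(0,'064b') = 64 zeros)
def fmt064b (m : Nat) : List Char :=
  List.replicate (64 - (natBits m).length) '0' ++ natBits m

-- [::-1] → List.reverse; ''.join(… for v in _data) → String.join ∘ List.map
def craft_alt (_data : List Int) : String :=
  String.join (_data.map (fun value =>
    String.ofList (fmt064b (PySem.Int.mod value ((1:Int) <<< (64:Nat))).toNat).reverse))

-- ===== PRECONDITION & SPEC =====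
def Spec_craft (_data : List Int) (out : String) : Prop := out = craft_alt _data
instance (_data : List Int) (out : String) : Decidable (Spec_craft _data out) := by unfold Spec_craft; infer_instance

-- ===== CLAIM (what is proved, stated in full; the proofs are below) =====
def Claim_equal_craft : Prop := ∀ (_data : List Int), Dom_craft _data → Spec_craft _data (craft _data)

-- ===== LEMMAS AND PROOFS =====

-- the LSB-first bit list A's inner loop emits for one value
def bitsLEI : Int → Nat → List Char
  | _, 0 => []
  | v, (k+1) => (if PySem.Int.band v 1 ≠ 0 then '1' else '0') :: bitsLEI (v >>> (1:Nat)) k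

-- the LSB-first k-bit list of a nonnegative m
def bitsLE : Nat → Nat → List Char
  | _, 0 => []
  | m, (k+1) => (if m % 2 = 1 then '1' else '0') :: bitsLE (m/2) k

theorem ofList_cons (c : Char) (l : List Char) :
    String.ofList [c] ++ String.ofList l = String.ofList (c :: l) := by
  rw [← String.ofList_append]; rfl

theorem innerA (l : List Nat) : ∀ (p : String) (v : Int),
    ((l.foldl (fun (st : String × Int) _ =>
        (if PySem.Int.band st.2 1 ≠ 0 then st.1 ++ "1" else st.1 ++ "0", st.2 >>> (1:Nat)))
      (p, v)).1) = p ++ String.ofList (bitsLEI v l.length) := by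
  induction l with
  | nil => intro p v; simp [bitsLEI]
  | cons a l ih =>
    intro p v
    simp only [List.foldl_cons, List.length_cons, bitsLEI]
    rw [ih]
    split_ifs with h
    · rw [String.append_assoc]; congr 1
      rw [show ("1":String) = String.ofList ['1'] from rfl, ofList_cons]
    · rw [String.append_assoc]; congr 1
      rw [show ("0":String) = String.ofList ['0'] from rfl, ofList_cons]

theorem halve (v P : Int) (hP : 0 < P) : (v % (2*P)) / 2 = (v / 2) % P := by
  have h2P : (0:Int) < 2*P := by omega
  have hv : (2*P) * (v / (2*P)) + v % (2*P) = v := Int.mul_ediv_add_emod v (2*P)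
  have h0 : 0 ≤ v % (2*P) := Int.emod_nonneg v (by omega)
  have h1 : v % (2*P) < 2*P := Int.emod_lt_of_pos v h2P
  have e1 : 2 * ((v % (2*P)) / 2) + (v % (2*P)) % 2 = v % (2*P) :=
    Int.mul_ediv_add_emod _ 2
  have e2 : 0 ≤ (v % (2*P)) % 2 := Int.emod_nonneg _ (by norm_num)
  have e3 : (v % (2*P)) % 2 < 2 := Int.emod_lt_of_pos _ (by norm_num)
  have hdiv : v / 2 = (v % (2*P)) / 2 + P * (v / (2*P)) := by
    conv_lhs => rw [show v = v % (2*P) + 2*(P*(v / (2*P))) by linarith [hv]]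
    exact Int.add_mul_ediv_left _ _ (by norm_num : (2:Int) ≠ 0)
  rw [hdiv, Int.add_mul_emod_self_left]
  exact (Int.emod_eq_of_lt (by omega) (by omega)).symm

theorem bitsLEI_eq (n : Nat) : ∀ v : Int, bitsLEI v n = bitsLE ((v % (2^n : Int)).toNat) n := by
  induction n with
  | zero => intro v; rfl
  | succ n ih =>
    intro v
    have hPn : (0:Int) < 2^n := by positivity
    have hm0 : 0 ≤ v % (2^(n+1) : Int) := Int.emod_nonneg v (by positivity)
    have hmod2 : (v % (2^(n+1) : Int)) % 2 = v % 2 :=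
      Int.emod_emod_of_dvd v ⟨2^n, by ring⟩
    have hv2 : 0 ≤ v % 2 := Int.emod_nonneg v (by norm_num)
    have hv2' : v % 2 < 2 := Int.emod_lt_of_pos v (by norm_num)
    have hhead : (PySem.Int.band v 1 ≠ 0) ↔ ((v % (2^(n+1) : Int)).toNat % 2 = 1) := by
      rw [PySem.Int.band_one, PySem.Int.mod_eq_emod_of_pos (by norm_num)]
      omega
    have htail : (v >>> (1:Nat)) = v / 2 := by
      simp [Int.shiftRight_eq_div_pow]
    have hhalf : ((v % (2^(n+1) : Int)).toNat) / 2 = ((v / 2) % (2^n : Int)).toNat := by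
      have := halve v (2^n) hPn
      rw [show (2:Int) * 2^n = 2^(n+1) by ring] at this
      omega
    simp only [bitsLEI, bitsLE, htail, ih, hhalf]
    congr 1
    by_cases h : PySem.Int.band v 1 ≠ 0
    · rw [if_pos h, if_pos (hhead.mp h)]
    · rw [if_neg h, if_neg (fun hc => h (hhead.mpr hc))]

theorem bitsLE_eq (k : Nat) : ∀ m : Nat, m < 2^k →
    (natBits m).reverse ++ List.replicate (k - (natBits m).length) '0' = bitsLE m k := by
  induction k with
  | zero => intro m hm; interval_cases m; simp [natBits, bitsLE]
  | succ k ih =>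
    intro m hm
    rcases m with _ | j
    · have h0 : natBits 0 = [] := by rw [natBits]
      have := ih 0 (by positivity)
      simp only [h0, List.reverse_nil, List.nil_append, List.length_nil, Nat.sub_zero] at this ⊢
      rw [show bitsLE 0 (k+1) = '0' :: bitsLE 0 k by rw [bitsLE]; norm_num, ← this]
      simp [List.replicate_succ]
    · have hrec : natBits (j+1) = natBits ((j+1)/2) ++ [if (j+1) % 2 = 1 then '1' else '0'] := by rw [natBits]
      have hlt : (j+1)/2 < 2^k := by
        have : (2:Nat)^(k+1) = 2*2^k := by ring
        omega
      have := ih ((j+1)/2) hlt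
      rw [hrec]
      simp only [List.reverse_append, List.reverse_singleton, List.length_append,
        List.length_singleton, List.cons_append]
      rw [show bitsLE (j+1) (k+1) = (if (j+1) % 2 = 1 then '1' else '0') :: bitsLE ((j+1)/2) k by rw [bitsLE]]
      rw [← this, show k + 1 - ((natBits ((j+1)/2)).length + 1) = k - (natBits ((j+1)/2)).length by omega]
      simp

theorem perval (v : Int) :
    String.ofList (fmt064b (PySem.Int.mod v ((1:Int) <<< (64:Nat))).toNat).reverse
      = String.ofList (bitsLEI v 64) := by
  have hsh : ((1:Int) <<< (64:Nat)) = 2^64 := by decide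
  have hmod : PySem.Int.mod v ((1:Int) <<< (64:Nat)) = v % ((2:Int)^(64:Nat)) := by
    rw [hsh, PySem.Int.mod_eq_emod_of_pos (by positivity)]
  have h0 : 0 ≤ v % ((2:Int)^(64:Nat)) := Int.emod_nonneg v (by positivity)
  have h1 : v % ((2:Int)^(64:Nat)) < 2^64 := Int.emod_lt_of_pos v (by positivity)
  have hm : (v % ((2:Int)^(64:Nat))).toNat < 2^64 := by
    have hp : ((2:Int)^(64:Nat)) = ((2^64 : Nat) : Int) := by norm_cast
    omega
  rw [hmod, bitsLEI_eq 64 v, ← bitsLE_eq 64 _ hm]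
  unfold fmt064b
  rw [List.reverse_append, List.reverse_replicate]

theorem strfold (l : List String) : ∀ a : String,
    l.foldl (· ++ ·) a = a ++ l.foldl (· ++ ·) "" := by
  induction l with
  | nil => intro a; simp
  | cons b l ih =>
    intro a
    simp only [List.foldl_cons]
    rw [ih (a ++ b), ih ("" ++ b)]
    simp [String.append_assoc]

theorem join_cons (a : String) (l : List String) :
    String.join (a :: l) = a ++ String.join l := by
  simp only [String.join, List.foldl_cons]
  rw [strfold l ("" ++ a)]
  simp

theorem craftA (l : List Int) : ∀ s : String,
    (l.foldl (fun payload value =>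
      ((List.range 64).foldl (fun (st : String × Int) _ =>
          (if PySem.Int.band st.2 1 ≠ 0 then st.1 ++ "1" else st.1 ++ "0", st.2 >>> (1:Nat)))
        (payload, value)).1) s)
    = s ++ String.join (l.map (fun v => String.ofList (bitsLEI v 64))) := by
  induction l with
  | nil => intro s; simp [String.join]
  | cons v l ih =>
    intro s
    simp only [List.foldl_cons, List.map_cons]
    rw [innerA (List.range 64) s v]
    simp only [List.length_range]
    rw [ih, join_cons, String.append_assoc]

-- ===== VERDICT (by name: the statement is the Claim_ definition above) =====
theorem craft_spec : Claim_equal_craft := by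
  intro _data _
  unfold Spec_craft craft craft_alt
  rw [craftA _data ""]
  have hmap : (fun v => String.ofList (fmt064b (PySem.Int.mod v ((1:Int) <<< (64:Nat))).toNat).reverse)
      = (fun v : Int => String.ofList (bitsLEI v 64)) := funext perval
  rw [hmap]
  simp
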